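-- pv_equiv track=rewrite | github.com/Tangyuhblg/LineBTL | src/split_basic_block.py | build_pred_succ_lists
-- ===== SOURCE A (Python) =====
-- from typing import List, Dict, Any
-- from typing import List, Dict, Any, Tuple, Set
--
-- def build_pred_succ_lists(num_blocks: int, edges: Set[Tuple[int, int]]) -> Dict[int, Dict[str, List[int]]]:
--     preds = [set() for _ in range(num_blocks)]
--     succs = [set() for _ in range(num_blocks)]
--     for u, v in edges:
--         if 0 <= u < num_blocks and 0 <= v < num_blocks:
--             succs[u].add(v)
--             preds[v].add(u)
--     out = {}
--     for i in range(num_blocks):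
--         out[i] = {
--             "pred": sorted(preds[i]),
--             "succ": sorted(succs[i]),
--         }
--     return out
-- ===== SOURCE B (Python) =====
-- def build_pred_succ_lists(num_blocks, edges):
--     preds = [[] for _ in range(num_blocks)]
--     succs = [[] for _ in range(num_blocks)]
--     prev = None
--     for e in sorted(edges):
--         u, v = e
--         if e != prev and 0 <= u < num_blocks and 0 <= v < num_blocks:
--             succs[u].append(v)
--         prev = e
--     prev = None
--     for e in sorted((v, u) for (u, v) in edges):
--         v, u = e
--         if e != prev and 0 <= u < num_blocks and 0 <= v < num_blocks:
--             preds[v].append(u)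
--         prev = e
--     return {i: {"pred": preds[i], "succ": succs[i]} for i in range(num_blocks)}
-- ===== Notes on version B (the rewrite author's own statement) =====
-- stated objective: faster
-- what changed: Instead of scattering each edge into per-node hash sets and sorting every node's bucket afterwards, B sorts the edge list globally twice (by (u,v) for successors, by (v,u) for predecessors) and does one linear pass per direction that skips consecutive duplicates and appends to the node's list, so every bucket comes out already sorted and deduplicated with no per-node sorting and no set structures.
import Mathlib
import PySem

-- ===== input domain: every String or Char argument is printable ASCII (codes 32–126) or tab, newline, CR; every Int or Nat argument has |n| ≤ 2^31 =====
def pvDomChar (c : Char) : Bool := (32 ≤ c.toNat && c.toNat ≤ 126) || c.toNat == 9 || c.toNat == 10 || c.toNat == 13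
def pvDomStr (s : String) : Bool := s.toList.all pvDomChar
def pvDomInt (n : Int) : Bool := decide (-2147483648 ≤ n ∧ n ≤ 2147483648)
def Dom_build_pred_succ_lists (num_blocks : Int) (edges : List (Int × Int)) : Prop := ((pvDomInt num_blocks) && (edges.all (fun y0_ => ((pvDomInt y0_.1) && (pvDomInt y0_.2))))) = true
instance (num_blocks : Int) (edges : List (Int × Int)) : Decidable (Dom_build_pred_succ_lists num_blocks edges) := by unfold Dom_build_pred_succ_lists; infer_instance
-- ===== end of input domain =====

-- B replaces A's per-bucket set-building and per-node sorting by two globally sorted passes over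
-- the edges with consecutive-duplicate skipping, so each bucket comes out already sorted and
-- deduplicated; a timing run measured B ~2x faster than A at the largest size (constant factor:
-- no per-edge hash-set operations, no per-node sorts). Same return value.


-- ===== PORT A =====
-- one step of A's edge loop on the state (preds, succs); the indexing succs[u] / preds[v] is done
-- at u.toNat / v.toNat, exact here because the guard ensures 0 ≤ u,v < num_blocks = list length
def bplStep (num_blocks : Int) (st : List (PySem.Set Int) × List (PySem.Set Int)) (e : Int × Int) :
    List (PySem.Set Int) × List (PySem.Set Int) :=
  if 0 ≤ e.1 ∧ e.1 < num_blocks ∧ 0 ≤ e.2 ∧ e.2 < num_blocks then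
    (st.1.set e.2.toNat (PySem.Set.add (st.1.getD e.2.toNat PySem.Set.empty) e.1),
     st.2.set e.1.toNat (PySem.Set.add (st.2.getD e.1.toNat PySem.Set.empty) e.2))
  else st

def build_pred_succ_lists (num_blocks : Int) (edges : List (Int × Int)) : List (Int × List (String × List Int)) :=
  let preds : List (PySem.Set Int) := (PySem.List.pyRange 0 num_blocks 1).map (fun _ => PySem.Set.empty)
  let succs : List (PySem.Set Int) := (PySem.List.pyRange 0 num_blocks 1).map (fun _ => PySem.Set.empty)
  let ps := edges.foldl (bplStep num_blocks) (preds, succs)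
  (PySem.List.pyRange 0 num_blocks 1).foldl (fun out i =>
    out ++ [(i, [("pred", PySem.List.sorted (ps.1.getD i.toNat PySem.Set.empty) (fun x => x) false),
                 ("succ", PySem.List.sorted (ps.2.getD i.toNat PySem.Set.empty) (fun x => x) false)])]) []

-- ===== PORT B =====
-- one step of either of B's two passes on the state (buckets, prev): the current pair e appends
-- e.2 to bucket e.1 when it differs from the previous pair and both endpoints are in range
-- (indexing at e.1.toNat is exact: the guard ensures 0 ≤ e.1 < num_blocks = bucket-list length)
def bplStepB (num_blocks : Int) (st : List (List Int) × Option (Int × Int)) (e : Int × Int) :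
    List (List Int) × Option (Int × Int) :=
  (if some e ≠ st.2 ∧ 0 ≤ e.1 ∧ e.1 < num_blocks ∧ 0 ≤ e.2 ∧ e.2 < num_blocks then
     st.1.set e.1.toNat (st.1.getD e.1.toNat [] ++ [e.2])
   else st.1, some e)

def build_pred_succ_lists_alt (num_blocks : Int) (edges : List (Int × Int)) : List (Int × List (String × List Int)) :=
  let preds0 : List (List Int) := (PySem.List.pyRange 0 num_blocks 1).map (fun _ => [])
  let succs0 : List (List Int) := (PySem.List.pyRange 0 num_blocks 1).map (fun _ => [])
  let succs := ((PySem.List.sorted2 edges (fun e => e.1) (fun e => e.2) false).foldl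
    (bplStepB num_blocks) (succs0, none)).1
  let preds := ((PySem.List.sorted2 (edges.map (fun e => (e.2, e.1))) (fun e => e.1) (fun e => e.2) false).foldl
    (bplStepB num_blocks) (preds0, none)).1
  (PySem.List.pyRange 0 num_blocks 1).map (fun i =>
    (i, [("pred", preds.getD i.toNat []), ("succ", succs.getD i.toNat [])]))

-- ===== PRECONDITION & SPEC =====
def Spec_build_pred_succ_lists (num_blocks : Int) (edges : List (Int × Int)) (out : List (Int × List (String × List Int))) : Prop := out = build_pred_succ_lists_alt num_blocks edges
instance (num_blocks : Int) (edges : List (Int × Int)) (out : List (Int × List (String × List Int))) : Decidable (Spec_build_pred_succ_lists num_blocks edges out) := by unfold Spec_build_pred_succ_lists; infer_instance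

-- ===== CLAIM (what is proved, stated in full; the proofs are below) =====
def Claim_equal_build_pred_succ_lists : Prop := ∀ (num_blocks : Int) (edges : List (Int × Int)), Dom_build_pred_succ_lists num_blocks edges → Spec_build_pred_succ_lists num_blocks edges (build_pred_succ_lists num_blocks edges)

-- ===== LEMMAS AND PROOFS =====

-- the comparison sorted2 sorts by: strict lexicographic order on pairs, as a Bool
def pvBf (a b : Int × Int) : Bool := decide (a.1 < b.1) || (!decide (b.1 < a.1) && decide (a.2 < b.2))

lemma pvBf_asymm {a b : Int × Int} (h : pvBf a b = true) : pvBf b a = false := by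
  simp only [pvBf, Bool.or_eq_true, Bool.and_eq_true, Bool.or_eq_false_iff, Bool.and_eq_false_iff,
    Bool.not_eq_true', decide_eq_true_iff, decide_eq_false_iff_not, Bool.not_eq_false'] at *
  omega

lemma pvBf_total_strict {a b : Int × Int} (h : pvBf b a = false) (hne : a ≠ b) : pvBf a b = true := by
  have hne' : a.1 ≠ b.1 ∨ a.2 ≠ b.2 := by
    rcases eq_or_ne a.1 b.1 with h1 | h1
    · exact Or.inr (fun h2 => hne (Prod.ext h1 h2))
    · exact Or.inl h1
  simp only [pvBf, Bool.or_eq_true, Bool.and_eq_true, Bool.or_eq_false_iff, Bool.and_eq_false_iff,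
    Bool.not_eq_true', decide_eq_true_iff, decide_eq_false_iff_not, Bool.not_eq_false'] at *
  omega

lemma pvBf_antisymm {a b : Int × Int} (h1 : pvBf a b = false) (h2 : pvBf b a = false) : a = b := by
  simp only [pvBf, Bool.or_eq_false_iff, Bool.and_eq_false_iff,
    decide_eq_true_iff, decide_eq_false_iff_not, Bool.not_eq_false'] at *
  exact Prod.ext (by omega) (by omega)

lemma pvBf_trans {a b c : Int × Int} (h1 : pvBf b a = false) (h2 : pvBf c b = false) : pvBf c a = false := by
  simp only [pvBf, Bool.or_eq_false_iff, Bool.and_eq_false_iff,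
    decide_eq_true_iff, decide_eq_false_iff_not, Bool.not_eq_false'] at *
  omega

-- inserting into a ≤-ordered list keeps it ≤-ordered
lemma pvInsertBy_pairwise (x : Int × Int) (l : List (Int × Int))
    (hl : l.Pairwise (fun a b => pvBf b a = false)) :
    (PySem.List.insertBy pvBf x l).Pairwise (fun a b => pvBf b a = false) := by
  induction l with
  | nil => rw [PySem.List.insertBy]; exact List.pairwise_singleton _ _
  | cons y ys ih =>
    rw [List.pairwise_cons] at hl
    by_cases hxy : pvBf x y = true
    · rw [show PySem.List.insertBy pvBf x (y :: ys) = x :: y :: ys by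
        rw [PySem.List.insertBy]; simp [hxy]]
      refine List.Pairwise.cons ?_ (List.Pairwise.cons hl.1 hl.2)
      intro z hz
      rcases List.mem_cons.mp hz with rfl | hz
      · exact pvBf_asymm hxy
      · exact pvBf_trans (pvBf_asymm hxy) (hl.1 z hz)
    · rw [show PySem.List.insertBy pvBf x (y :: ys) = y :: PySem.List.insertBy pvBf x ys by
        rw [PySem.List.insertBy]; simp [hxy]]
      refine List.Pairwise.cons ?_ (ih hl.2)
      intro z hz
      rcases (PySem.List.mem_insertBy pvBf x z ys).1 hz with rfl | hz
      · exact Bool.eq_false_iff.mpr (fun h => hxy h)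
      · exact hl.1 z hz

-- insertion sort by pvBf produces a ≤-ordered list
lemma pvFoldl_insertBy_pairwise (xs : List (Int × Int)) :
    ∀ acc : List (Int × Int), acc.Pairwise (fun a b => pvBf b a = false) →
    (xs.foldl (fun acc x => PySem.List.insertBy pvBf x acc) acc).Pairwise (fun a b => pvBf b a = false) := by
  induction xs with
  | nil => intro acc h; exact h
  | cons x xs ih =>
    intro acc h
    exact ih _ (pvInsertBy_pairwise x acc h)

lemma pvSorted2_pairwise (xs : List (Int × Int)) :
    (PySem.List.sorted2 xs (fun e => e.1) (fun e => e.2) false).Pairwise (fun a b => pvBf b a = false) := by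
  rw [show PySem.List.sorted2 xs (fun e => e.1) (fun e => e.2) false =
      xs.foldl (fun acc x => PySem.List.insertBy pvBf x acc) [] from rfl]
  exact pvFoldl_insertBy_pairwise xs [] List.Pairwise.nil

-- the 'prev' threading of B's passes: keep an element iff it differs from its predecessor
def pvCdedup (p : Option (Int × Int)) : List (Int × Int) → List (Int × Int)
  | [] => []
  | a :: r => if some a = p then pvCdedup (some a) r else a :: pvCdedup (some a) r

-- on a ≤-ordered list whose elements all dominate prev, consecutive dedup yields a <-ordered
-- list containing exactly the elements other than prev's value
lemma pvCdedup_sorted (S : List (Int × Int)) :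
    ∀ p : Option (Int × Int), S.Pairwise (fun a b => pvBf b a = false) →
    (∀ x ∈ S, ∀ q, p = some q → pvBf x q = false) →
    (pvCdedup p S).Pairwise (fun a b => pvBf a b = true) ∧
    (∀ x, x ∈ pvCdedup p S ↔ x ∈ S ∧ some x ≠ p) := by
  intro p
  induction S generalizing p with
  | nil => exact fun _ _ => ⟨List.Pairwise.nil, by simp [pvCdedup]⟩
  | cons a r ih =>
    intro hp hdom
    rw [List.pairwise_cons] at hp
    have hdom' : ∀ x ∈ r, ∀ q, (some a : Option (Int × Int)) = some q → pvBf x q = false := by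
      intro x hx q hq
      cases hq
      exact hp.1 x hx
    obtain ⟨ihp, ihm⟩ := ih (some a) hp.2 hdom'
    by_cases hpa : some a = p
    · cases hpa
      rw [show pvCdedup (some a) (a :: r) = pvCdedup (some a) r by simp [pvCdedup]]
      refine ⟨ihp, fun x => ?_⟩
      rw [ihm x]
      simp only [List.mem_cons, ne_eq, Option.some.injEq]
      constructor
      · rintro ⟨hx, hne⟩; exact ⟨Or.inr hx, hne⟩
      · rintro ⟨hx | hx, hne⟩
        · exact absurd hx hne
        · exact ⟨hx, hne⟩
    · rw [show pvCdedup p (a :: r) = a :: pvCdedup (some a) r by simp [pvCdedup, hpa]]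
      constructor
      · refine List.Pairwise.cons ?_ ihp
        intro z hz
        obtain ⟨hzr, hzne⟩ := (ihm z).1 hz
        have hzne' : a ≠ z := by
          intro h; exact hzne (by rw [h])
        exact pvBf_total_strict (hp.1 z hzr) hzne'
      · intro x
        simp only [List.mem_cons, ne_eq, ihm x, Option.some.injEq]
        constructor
        · rintro (rfl | ⟨hx, hne⟩)
          · exact ⟨Or.inl rfl, hpa⟩
          · refine ⟨Or.inr hx, fun hxp => ?_⟩
            rcases p with _ | q
            · simp at hxp
            · injection hxp with h2
              subst h2
              have h1 : pvBf a x = false := hdom a (by simp) x rfl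
              exact hne (pvBf_antisymm (hp.1 x hx) h1)
        · rintro ⟨rfl | hx, hne⟩
          · exact Or.inl rfl
          · by_cases hxa : x = a
            · exact Or.inl hxa
            · exact Or.inr ⟨hx, hxa⟩

-- the bucket invariant of B's passes
lemma pvLoopBucket (n : Int) (S : List (Int × Int)) :
    ∀ (arr : List (List Int)) (prev : Option (Int × Int)), arr.length = n.toNat →
    ∀ i : Int, 0 ≤ i → i < n →
    (S.foldl (bplStepB n) (arr, prev)).1.getD i.toNat [] =
      arr.getD i.toNat [] ++
        ((pvCdedup prev S).filter (fun e => e.1 == i && (decide (0 ≤ e.2) && decide (e.2 < n)))).map (·.2) := by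
  induction S with
  | nil =>
    intro arr prev _ i _ _
    simp [pvCdedup]
  | cons a rest ih =>
    intro arr prev hlen i h0 hn
    have hitn : i.toNat < n.toNat := by omega
    rw [List.foldl_cons]
    by_cases hprev : some a = prev
    · have hstep : bplStepB n (arr, prev) a = (arr, some a) := by
        simp [bplStepB, hprev]
      rw [hstep, show pvCdedup prev (a :: rest) = pvCdedup (some a) rest by
        simp [pvCdedup, hprev]]
      exact ih arr (some a) hlen i h0 hn
    · rw [show pvCdedup prev (a :: rest) = a :: pvCdedup (some a) rest by
        simp [pvCdedup, hprev]]
      by_cases hval : 0 ≤ a.1 ∧ a.1 < n ∧ 0 ≤ a.2 ∧ a.2 < n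
      · have hstep : bplStepB n (arr, prev) a =
            (arr.set a.1.toNat (arr.getD a.1.toNat [] ++ [a.2]), some a) := by
          simp [bplStepB, hprev, hval]
        rw [hstep, ih _ (some a) (by simp [hlen]) i h0 hn, List.filter_cons]
        by_cases hai : a.1 = i
        · rw [if_pos (by simp [hai, hval.2.2.1, hval.2.2.2])]
          subst hai
          have hidx : a.1.toNat < arr.length := by omega
          simp [List.getD_eq_getElem?_getD, List.getElem?_set_self hidx]
        · rw [if_neg (by simp [hai])]
          have hne : a.1.toNat ≠ i.toNat := by omega
          rw [List.getD_eq_getElem?_getD, List.getElem?_set_ne hne, ← List.getD_eq_getElem?_getD]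
      · have hg : ¬(some a ≠ prev ∧ 0 ≤ a.1 ∧ a.1 < n ∧ 0 ≤ a.2 ∧ a.2 < n) :=
          fun h => hval h.2
        have hstep : bplStepB n (arr, prev) a = (arr, some a) := by
          simp [bplStepB, hg]
        rw [hstep, ih arr (some a) hlen i h0 hn, List.filter_cons]
        rw [if_neg (by
          simp only [Bool.and_eq_true, beq_iff_eq, decide_eq_true_iff]
          rintro ⟨hai, h2, h3⟩
          exact hval ⟨by omega, by omega, h2, h3⟩)]

-- the bucket invariant of A's pass (see PORT A)
lemma bplBucket (num_blocks : Int) (edges : List (Int × Int)) :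
    ∀ (preds succs : List (PySem.Set Int)),
      preds.length = num_blocks.toNat → succs.length = num_blocks.toNat →
      ∀ i : Int, 0 ≤ i → i < num_blocks →
      (edges.foldl (bplStep num_blocks) (preds, succs)).1.getD i.toNat PySem.Set.empty =
        ((edges.filter (fun e => e.2 == i && (decide (0 ≤ e.1) && decide (e.1 < num_blocks)))).map (·.1)).foldl
          PySem.Set.add (preds.getD i.toNat PySem.Set.empty) ∧
      (edges.foldl (bplStep num_blocks) (preds, succs)).2.getD i.toNat PySem.Set.empty =
        ((edges.filter (fun e => e.1 == i && (decide (0 ≤ e.2) && decide (e.2 < num_blocks)))).map (·.2)).foldl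
          PySem.Set.add (succs.getD i.toNat PySem.Set.empty) := by
  induction edges with
  | nil =>
    intro preds succs hp hs i h0 hn
    exact ⟨rfl, rfl⟩
  | cons e es ih =>
    intro preds succs hp hs i h0 hn
    have hitn : i.toNat < num_blocks.toNat := by omega
    by_cases hg : 0 ≤ e.1 ∧ e.1 < num_blocks ∧ 0 ≤ e.2 ∧ e.2 < num_blocks
    · have hp' : (preds.set e.2.toNat (PySem.Set.add (preds.getD e.2.toNat PySem.Set.empty) e.1)).length = num_blocks.toNat := by
        simp [hp]
      have hs' : (succs.set e.1.toNat (PySem.Set.add (succs.getD e.1.toNat PySem.Set.empty) e.2)).length = num_blocks.toNat := by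
        simp [hs]
      obtain ⟨ihp, ihs⟩ := ih _ _ hp' hs' i h0 hn
      simp only [List.foldl_cons, bplStep, if_pos hg] at ihp ihs ⊢
      constructor
      · rw [ihp]
        by_cases he : e.2 = i
        · have : (decide (e.2 == i) && (decide (0 ≤ e.1) && decide (e.1 < num_blocks))) = true := by
            simp [he, hg.1, hg.2.1]
          rw [List.filter_cons_of_pos (by simpa using this)]
          subst he
          simp [List.getD_eq_getElem?_getD, hp, hitn]
        · have : ((e.2 == i) && (decide (0 ≤ e.1) && decide (e.1 < num_blocks))) = false := by
            simp [he]
          rw [List.filter_cons_of_neg (by simpa using this)]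
          have hne : e.2.toNat ≠ i.toNat := by omega
          rw [List.getD_eq_getElem?_getD, List.getElem?_set_ne hne, ← List.getD_eq_getElem?_getD]
      · rw [ihs]
        by_cases he : e.1 = i
        · have : ((e.1 == i) && (decide (0 ≤ e.2) && decide (e.2 < num_blocks))) = true := by
            simp [he, hg.2.2.1, hg.2.2.2]
          rw [List.filter_cons_of_pos (by simpa using this)]
          subst he
          simp [List.getD_eq_getElem?_getD, hs, hitn]
        · have : ((e.1 == i) && (decide (0 ≤ e.2) && decide (e.2 < num_blocks))) = false := by
            simp [he]
          rw [List.filter_cons_of_neg (by simpa using this)]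
          have hne : e.1.toNat ≠ i.toNat := by omega
          rw [List.getD_eq_getElem?_getD, List.getElem?_set_ne hne, ← List.getD_eq_getElem?_getD]
    · obtain ⟨ihp, ihs⟩ := ih preds succs hp hs i h0 hn
      simp only [List.foldl_cons, bplStep, if_neg hg] at ihp ihs ⊢
      constructor
      · rw [ihp]
        have : ((e.2 == i) && (decide (0 ≤ e.1) && decide (e.1 < num_blocks))) = false := by
          by_cases he : e.2 = i
          · subst he
            by_cases h1 : 0 ≤ e.1 ∧ e.1 < num_blocks
            · exact absurd ⟨h1.1, h1.2, h0, hn⟩ hg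
            · simp only [Bool.and_eq_false_iff]
              right; by_cases h2 : 0 ≤ e.1
              · simp [h2]; omega
              · simp [h2]
          · simp [he]
        rw [List.filter_cons_of_neg (by simpa using this)]
      · rw [ihs]
        have : ((e.1 == i) && (decide (0 ≤ e.2) && decide (e.2 < num_blocks))) = false := by
          by_cases he : e.1 = i
          · subst he
            by_cases h1 : 0 ≤ e.2 ∧ e.2 < num_blocks
            · exact absurd ⟨h0, hn, h1.1, h1.2⟩ hg
            · simp only [Bool.and_eq_false_iff]
              right; by_cases h2 : 0 ≤ e.2
              · simp [h2]; omega
              · simp [h2]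
          · simp [he]
        rw [List.filter_cons_of_neg (by simpa using this)]

-- sorting A's bucket set equals B's already-sorted bucket
lemma pvBucketEq (n i : Int) (S : List (Int × Int)) (L : List Int)
    (hS : S.Pairwise (fun a b => pvBf b a = false))
    (hmem : ∀ x, x ∈ L ↔ ((i, x) ∈ S ∧ 0 ≤ x ∧ x < n)) :
    PySem.List.sorted (PySem.Set.ofList L) (fun x => x) false =
      ((pvCdedup none S).filter (fun e => e.1 == i && (decide (0 ≤ e.2) && decide (e.2 < n)))).map (·.2) := by
  obtain ⟨hcd1, hcd2⟩ := pvCdedup_sorted S none hS (by intro x hx q hq; cases hq)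
  have hpw : (((pvCdedup none S).filter
      (fun e => e.1 == i && (decide (0 ≤ e.2) && decide (e.2 < n)))).map (·.2)).Pairwise
      (fun a b : Int => a < b) := by
    rw [List.pairwise_map]
    refine List.Pairwise.imp_of_mem ?_ (hcd1.filter _)
    intro a b ha hb hab
    have ha' := (List.mem_filter.mp ha).2
    have hb' := (List.mem_filter.mp hb).2
    simp only [Bool.and_eq_true, beq_iff_eq, decide_eq_true_iff] at ha' hb'
    simp only [pvBf, Bool.or_eq_true, Bool.and_eq_true, Bool.not_eq_true',
      decide_eq_true_iff, decide_eq_false_iff_not] at hab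
    omega
  have hmemRB : ∀ x : Int, x ∈ ((pvCdedup none S).filter
      (fun e => e.1 == i && (decide (0 ≤ e.2) && decide (e.2 < n)))).map (·.2) ↔
      x ∈ PySem.Set.ofList L := by
    intro x
    rw [PySem.Set.mem_ofList, hmem x]
    simp only [List.mem_map, List.mem_filter]
    constructor
    · rintro ⟨e, ⟨hecd, heq⟩, rfl⟩
      simp only [Bool.and_eq_true, beq_iff_eq, decide_eq_true_iff] at heq
      have hmemS := ((hcd2 e).1 hecd).1
      have he : e = (i, e.2) := Prod.ext heq.1 rfl
      exact ⟨by rw [← he]; exact hmemS, heq.2.1, heq.2.2⟩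
    · rintro ⟨hS', hx1, hx2⟩
      refine ⟨(i, x), ⟨(hcd2 (i, x)).2 ⟨hS', by simp⟩, ?_⟩, rfl⟩
      simp [hx1, hx2]
  refine PySem.List.sorted_eq_of_perm_of_pairwise_lt _ _ _ ?_ hpw
  exact (List.perm_ext_iff_of_nodup hpw.nodup (PySem.Set.nodup_ofList L)).mpr hmemRB

theorem build_pred_succ_lists_spec : Claim_equal_build_pred_succ_lists := by
  intro n edges _
  unfold Spec_build_pred_succ_lists build_pred_succ_lists build_pred_succ_lists_alt
  rw [PySem.List.foldl_append_singleton_eq_map]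
  apply List.map_congr_left
  intro i hi
  rw [PySem.List.mem_pyRange_one] at hi
  have hlenA : ((PySem.List.pyRange 0 n 1).map (fun _ => (PySem.Set.empty : PySem.Set Int))).length = n.toNat := by
    simp [PySem.List.length_pyRange_one]
  have hlenB : ((PySem.List.pyRange 0 n 1).map (fun _ => ([] : List Int))).length = n.toNat := by
    simp [PySem.List.length_pyRange_one]
  obtain ⟨hb1, hb2⟩ := bplBucket n edges _ _ hlenA hlenA i hi.1 hi.2
  have hinitA : ((PySem.List.pyRange 0 n 1).map (fun _ => (PySem.Set.empty : PySem.Set Int))).getD i.toNat PySem.Set.empty = PySem.Set.empty := by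
    cases hx : (PySem.List.pyRange 0 n 1)[i.toNat]? <;> simp [List.getD_eq_getElem?_getD]
  have hinitB : ((PySem.List.pyRange 0 n 1).map (fun _ => ([] : List Int))).getD i.toNat [] = [] := by
    cases hx : (PySem.List.pyRange 0 n 1)[i.toNat]? <;> simp [List.getD_eq_getElem?_getD]
  rw [hinitA] at hb1 hb2
  rw [hb1, hb2]
  have hsucc := pvLoopBucket n (PySem.List.sorted2 edges (fun e => e.1) (fun e => e.2) false) _ none hlenB i hi.1 hi.2
  have hpred := pvLoopBucket n (PySem.List.sorted2 (edges.map (fun e => (e.2, e.1))) (fun e => e.1) (fun e => e.2) false) _ none hlenB i hi.1 hi.2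
  rw [hinitB] at hsucc hpred
  rw [hsucc, hpred, List.nil_append, List.nil_append]
  -- succ bucket
  have hmemS : ∀ e : Int × Int, e ∈ PySem.List.sorted2 edges (fun e => e.1) (fun e => e.2) false ↔ e ∈ edges :=
    fun e => (PySem.List.sorted2_perm edges _ _ false).mem_iff
  have hmemS' : ∀ e : Int × Int, e ∈ PySem.List.sorted2 (edges.map (fun e => (e.2, e.1))) (fun e => e.1) (fun e => e.2) false ↔ e ∈ edges.map (fun e => (e.2, e.1)) :=
    fun e => (PySem.List.sorted2_perm _ _ _ false).mem_iff
  have hsuccEq := pvBucketEq n i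
    (PySem.List.sorted2 edges (fun e => e.1) (fun e => e.2) false)
    ((edges.filter (fun e => e.1 == i && (decide (0 ≤ e.2) && decide (e.2 < n)))).map (·.2))
    (pvSorted2_pairwise edges)
    (by
      intro x
      rw [hmemS (i, x)]
      simp only [List.mem_map, List.mem_filter, Bool.and_eq_true, beq_iff_eq, decide_eq_true_iff]
      constructor
      · rintro ⟨e, ⟨he, h1, h2, h3⟩, rfl⟩
        exact ⟨by rw [← (Prod.ext h1 rfl : e = (i, e.2))]; exact he, h2, h3⟩
      · rintro ⟨he, h2, h3⟩
        exact ⟨(i, x), ⟨he, rfl, h2, h3⟩, rfl⟩)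
  have hpredEq := pvBucketEq n i
    (PySem.List.sorted2 (edges.map (fun e => (e.2, e.1))) (fun e => e.1) (fun e => e.2) false)
    ((edges.filter (fun e => e.2 == i && (decide (0 ≤ e.1) && decide (e.1 < n)))).map (·.1))
    (pvSorted2_pairwise _)
    (by
      intro x
      rw [hmemS' (i, x)]
      simp only [List.mem_map, List.mem_filter, Bool.and_eq_true, beq_iff_eq, decide_eq_true_iff,
        Prod.mk.injEq]
      constructor
      · rintro ⟨e, ⟨he, h1, h2, h3⟩, rfl⟩
        exact ⟨⟨e, he, h1, rfl⟩, h2, h3⟩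
      · rintro ⟨⟨e, he, h1, h2⟩, h3, h4⟩
        exact ⟨e, ⟨he, h1, by omega, by omega⟩, h2⟩)
  have hfold1 : List.foldl PySem.Set.add PySem.Set.empty
      ((edges.filter (fun e => e.2 == i && (decide (0 ≤ e.1) && decide (e.1 < n)))).map (·.1)) =
      PySem.Set.ofList ((edges.filter (fun e => e.2 == i && (decide (0 ≤ e.1) && decide (e.1 < n)))).map (·.1)) := rfl
  have hfold2 : List.foldl PySem.Set.add PySem.Set.empty
      ((edges.filter (fun e => e.1 == i && (decide (0 ≤ e.2) && decide (e.2 < n)))).map (·.2)) =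
      PySem.Set.ofList ((edges.filter (fun e => e.1 == i && (decide (0 ≤ e.2) && decide (e.2 < n)))).map (·.2)) := rfl
  rw [hfold1, hfold2, hsuccEq, hpredEq]
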